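-- pv_equiv track=rewrite | github.com/shivaydwivedi/Leetcode_submissions | 3640-trionic-array-ii/3640-trionic-array-ii.py | maxSumTrionic
-- ===== SOURCE A (Python) =====
-- def maxSumTrionic(nums: list[int]) -> int:
--     n = len(nums)
--     if n < 4:
--         return 0
--
--     NEG = -10**18
--
--     inc = NEG     # valid only after an actual increase
--     dec = NEG     # valid only after inc + decrease
--     inc2 = NEG    # valid only after dec + increase
--
--     ans = NEG
--
--     for i in range(1, n):
--         a, b = nums[i - 1], nums[i]
--
--         if b > a:
--             # increasing
--             new_inc = max(inc + b, a + b)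
--             new_inc2 = dec + b if dec != NEG else NEG
--
--             inc = new_inc
--             inc2 = max(inc2 + b if inc2 != NEG else NEG, new_inc2)
--             dec = NEG
--
--         elif b < a:
--             # decreasing
--             new_dec = inc + b if inc != NEG else NEG
--
--             dec = max(dec + b if dec != NEG else NEG, new_dec)
--             inc = NEG
--             inc2 = NEG
--
--         else:
--             # equal breaks strictness
--             inc = dec = inc2 = NEG
--
--         if inc2 != NEG:
--             ans = max(ans, inc2)
--
--     return ans if ans != NEG else 0
-- ===== SOURCE B (Python) =====
-- def maxSumTrionic(nums: list[int]) -> int: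
--     n = len(nums)
--     if n < 4:
--         return 0
--
--     NEG = -10**18
--     pairs = list(zip(nums, nums[1:]))
--
--     # pass 1: best strictly-increasing sum of a subarray ending at each pair (NEG = none)
--     incEnd = []
--     cur = NEG
--     for a, b in pairs:
--         cur = max(cur + b, a + b) if b > a else NEG
--         incEnd.append(cur)
--
--     # pass 2: best inc-then-dec sum ending at each pair, reading incEnd shifted by one
--     decEnd = []
--     cur = NEG
--     for (a, b), incPrev in zip(pairs, [NEG] + incEnd):
--         cur = (max(cur + b if cur != NEG else NEG,
--                    incPrev + b if incPrev != NEG else NEG)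
--                if b < a else NEG)
--         decEnd.append(cur)
--
--     # pass 3: best inc-dec-inc (trionic) sum ending at each pair, reading decEnd shifted
--     trioEnd = []
--     cur = NEG
--     for (a, b), decPrev in zip(pairs, [NEG] + decEnd):
--         cur = (max(cur + b if cur != NEG else NEG,
--                    decPrev + b if decPrev != NEG else NEG)
--                if b > a else NEG)
--         trioEnd.append(cur)
--
--     # pass 4: best valid trionic value
--     ans = NEG
--     for v in trioEnd:
--         if v != NEG:
--             ans = max(ans, v)
--     return ans if ans != NEG else 0
-- ===== Notes on version B (the rewrite author's own statement) =====
-- stated objective: alternative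
-- what changed: Replaces A's fused single-pass DP threading four scalar state variables through one indexed loop with a multi-pass array pipeline: a zip of adjacent pairs, three separate scans building explicit incEnd/decEnd/trioEnd arrays (each pass reading the previous array shifted by one), and a final max pass over trioEnd.
import Mathlib
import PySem

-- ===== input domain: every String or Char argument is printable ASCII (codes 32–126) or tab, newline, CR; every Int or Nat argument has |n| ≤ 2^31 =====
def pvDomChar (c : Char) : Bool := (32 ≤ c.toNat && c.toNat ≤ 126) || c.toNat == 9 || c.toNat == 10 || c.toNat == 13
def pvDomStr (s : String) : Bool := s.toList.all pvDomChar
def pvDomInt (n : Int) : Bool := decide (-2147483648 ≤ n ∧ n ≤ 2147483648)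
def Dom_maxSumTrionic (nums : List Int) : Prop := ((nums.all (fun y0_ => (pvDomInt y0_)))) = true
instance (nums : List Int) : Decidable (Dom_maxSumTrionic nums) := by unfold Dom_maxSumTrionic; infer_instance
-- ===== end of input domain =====

-- B replaces A's fused one-loop four-variable DP by a multi-pass pipeline of explicit
-- incEnd/decEnd/trioEnd arrays plus a final max pass (objective: alternative; same cost).

def pvNEG : Int := -(10^18)

-- ===== PORT A =====
-- loop body of A's single for-loop, state (inc, dec, inc2, ans)
def stepA (st : Int × Int × Int × Int) (a b : Int) : Int × Int × Int × Int :=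
  let inc := st.1; let dec := st.2.1; let inc2 := st.2.2.1; let ans := st.2.2.2
  let (inc, dec, inc2) :=
    if b > a then
      let newInc := max (inc + b) (a + b)
      let newInc2 := if dec ≠ pvNEG then dec + b else pvNEG
      (newInc, pvNEG, max (if inc2 ≠ pvNEG then inc2 + b else pvNEG) newInc2)
    else if b < a then
      let newDec := if inc ≠ pvNEG then inc + b else pvNEG
      (pvNEG, max (if dec ≠ pvNEG then dec + b else pvNEG) newDec, pvNEG)
    else
      (pvNEG, pvNEG, pvNEG)
  let ans := if inc2 ≠ pvNEG then max ans inc2 else ans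
  (inc, dec, inc2, ans)

def maxSumTrionic (nums : List Int) : Int :=
  let n : Int := nums.length
  if n < 4 then 0
  else
    let s := (PySem.List.pyRange 1 n 1).foldl
      (fun st i => stepA st (PySem.List.pyGetD nums (i - 1) 0) (PySem.List.pyGetD nums i 0))
      (pvNEG, pvNEG, pvNEG, pvNEG)
    if s.2.2.2 ≠ pvNEG then s.2.2.2 else 0

-- ===== PORT B =====
def stepIncB (cur : Int) (p : Int × Int) : Int :=
  if p.2 > p.1 then max (cur + p.2) (p.1 + p.2) else pvNEG

def scanIncB : Int → List (Int × Int) → List Int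
  | _, [] => []
  | cur, p :: ps => let c := stepIncB cur p; c :: scanIncB c ps

def stepDecB (cur : Int) (q : (Int × Int) × Int) : Int :=
  if q.1.2 < q.1.1 then
    max (if cur ≠ pvNEG then cur + q.1.2 else pvNEG)
        (if q.2 ≠ pvNEG then q.2 + q.1.2 else pvNEG)
  else pvNEG

def scanDecB : Int → List ((Int × Int) × Int) → List Int
  | _, [] => []
  | cur, q :: qs => let c := stepDecB cur q; c :: scanDecB c qs

def stepTrioB (cur : Int) (q : (Int × Int) × Int) : Int :=
  if q.1.2 > q.1.1 then
    max (if cur ≠ pvNEG then cur + q.1.2 else pvNEG)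
        (if q.2 ≠ pvNEG then q.2 + q.1.2 else pvNEG)
  else pvNEG

def scanTrioB : Int → List ((Int × Int) × Int) → List Int
  | _, [] => []
  | cur, q :: qs => let c := stepTrioB cur q; c :: scanTrioB c qs

def ansStepB (ans v : Int) : Int := if v ≠ pvNEG then max ans v else ans

def maxSumTrionic_alt (nums : List Int) : Int :=
  if (nums.length : Int) < 4 then 0
  else
    let pairs := nums.zip nums.tail
    let incEnd := scanIncB pvNEG pairs
    let decEnd := scanDecB pvNEG (pairs.zip (pvNEG :: incEnd))
    let trioEnd := scanTrioB pvNEG (pairs.zip (pvNEG :: decEnd))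
    let ans := trioEnd.foldl ansStepB pvNEG
    if ans ≠ pvNEG then ans else 0

-- ===== PRECONDITION & SPEC =====
def Spec_maxSumTrionic (nums : List Int) (out : Int) : Prop := out = maxSumTrionic_alt nums
instance (nums : List Int) (out : Int) : Decidable (Spec_maxSumTrionic nums out) := by unfold Spec_maxSumTrionic; infer_instance

-- ===== CLAIM (what is proved, stated in full; the proofs are below) =====
def Claim_equal_maxSumTrionic : Prop := ∀ (nums : List Int), Dom_maxSumTrionic nums → Spec_maxSumTrionic nums (maxSumTrionic nums)

-- ===== LEMMAS AND PROOFS =====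

-- the indexed pairs A reads are exactly the zip of nums with its tail
theorem pairs_eq (nums : List Int) :
    (PySem.List.pyRange 1 (nums.length : Int) 1).map
      (fun i => (PySem.List.pyGetD nums (i - 1) 0, PySem.List.pyGetD nums i 0))
      = nums.zip nums.tail := by
  rw [PySem.List.pyRange_one]
  apply List.ext_getElem
  · simp
  · intro k h1 h2
    have hk : k + 1 < nums.length := by simp at h1; omega
    simp only [List.getElem_map, List.getElem_range, List.getElem_zip, List.getElem_tail]
    have e1 : (1 : Int) + (k : Int) - 1 = ((k : Nat) : Int) := by omega
    have e2 : (1 : Int) + (k : Int) = (((k + 1 : Nat)) : Int) := by push_cast; ring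
    rw [e1, e2, PySem.List.pyGetD_natCast, PySem.List.pyGetD_natCast]
    simp [List.getD_eq_getElem?_getD, List.getElem?_eq_getElem (by omega : k < nums.length),
      List.getElem?_eq_getElem hk]

-- A's indexed fold equals a fold over the zipped pairs
theorem foldA_eq (nums : List Int) (init : Int × Int × Int × Int) :
    (PySem.List.pyRange 1 (nums.length : Int) 1).foldl
      (fun st i => stepA st (PySem.List.pyGetD nums (i - 1) 0) (PySem.List.pyGetD nums i 0)) init
    = (nums.zip nums.tail).foldl (fun st p => stepA st p.1 p.2) init := by
  rw [← pairs_eq nums, List.foldl_map]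

-- one step of A equals the three B step functions plus the ans update
theorem step_eq (inc dec inc2 ans a b : Int) :
    stepA (inc, dec, inc2, ans) a b
      = (stepIncB inc (a, b), stepDecB dec ((a, b), inc), stepTrioB inc2 ((a, b), dec),
         ansStepB ans (stepTrioB inc2 ((a, b), dec))) := by
  simp only [stepA, stepIncB, stepDecB, stepTrioB, ansStepB]
  rcases lt_trichotomy a b with h | h | h
  · simp [h, not_lt.mpr (le_of_lt h)]
  · simp [h]
  · simp [h, not_lt.mpr (le_of_lt h)]

-- loop fusion: B's scan pipeline followed by the max pass equals A's fused fold
theorem fused (ps : List (Int × Int)) (inc dec inc2 ans : Int) :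
    (scanTrioB inc2 (ps.zip (dec :: scanDecB dec (ps.zip (inc :: scanIncB inc ps))))).foldl
        ansStepB ans
      = (ps.foldl (fun st p => stepA st p.1 p.2) (inc, dec, inc2, ans)).2.2.2 := by
  induction ps generalizing inc dec inc2 ans with
  | nil => simp [scanIncB, scanDecB, scanTrioB]
  | cons p ps ih =>
    obtain ⟨a, b⟩ := p
    simp only [scanIncB, scanDecB, scanTrioB, List.zip_cons_cons, List.foldl_cons]
    rw [step_eq, ih]

-- ===== VERDICT (by name: the statement is the Claim_ definition above) =====
theorem maxSumTrionic_spec : Claim_equal_maxSumTrionic := by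
  intro nums _
  unfold Spec_maxSumTrionic maxSumTrionic maxSumTrionic_alt
  by_cases h : (nums.length : Int) < 4
  · simp [h]
  · simp only [h, if_false]
    rw [foldA_eq, ← fused]
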